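-- pv_equiv track=rewrite | github.com/ShajahanAI/codewars | python/6 kyu/86.py | connect_four_place
-- ===== SOURCE A (Python) =====
-- def connect_four_place(columns):
--     board = [["-" for _ in range(7)] for _ in range(6)] # 7 columns and 6 rows
--     column_row_dict = {
--         column: 5 for column in range(7)
--     } # indicates which row to place next coin in
--     player = 'Y'
--     for move in columns:
--         row = column_row_dict[move]
--         column_row_dict[move] -= 1
--         board[row][move] = player
--         player = 'R' if player == 'Y' else 'Y'
--
--     return board
-- ===== SOURCE B (Python) =====
-- def connect_four_place(columns):
--     board = [["-" for _ in range(7)] for _ in range(6)]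
--     stacks = {column: [] for column in range(7)}
--     for i, move in enumerate(columns):
--         stacks[move].append('Y' if i % 2 == 0 else 'R')
--     for c in range(7):
--         for depth, coin in enumerate(stacks[c]):
--             board[5 - depth][c] = coin
--     return board
-- ===== Notes on version B (the rewrite author's own statement) =====
-- stated objective: alternative
-- what changed: Replaces the interleaved single-pass simulation (board + next-row dict + toggled player) with a two-pass bucket-then-fill decomposition: first group the coins (by move parity) into per-column stacks, then fill the board column by column at board[5-depth].
import Mathlib
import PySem

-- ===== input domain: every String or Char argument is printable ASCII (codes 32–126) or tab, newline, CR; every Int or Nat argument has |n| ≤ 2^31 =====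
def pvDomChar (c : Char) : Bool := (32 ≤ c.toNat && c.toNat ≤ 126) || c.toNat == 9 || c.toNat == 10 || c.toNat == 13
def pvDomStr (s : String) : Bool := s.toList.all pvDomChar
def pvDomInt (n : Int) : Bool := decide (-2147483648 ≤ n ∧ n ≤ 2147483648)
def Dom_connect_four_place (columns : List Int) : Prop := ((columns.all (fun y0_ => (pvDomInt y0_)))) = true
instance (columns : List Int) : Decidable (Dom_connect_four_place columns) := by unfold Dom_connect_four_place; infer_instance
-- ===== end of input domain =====

-- B replaces A's interleaved single-pass simulation with a bucket-then-fill two-pass decomposition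
-- (group coins into per-column stks first, then write each stack into the board); same cost, alternative shape.

-- ===== PORT A =====
def connect_four_place (columns : List Int) : List (List String) :=
  let board := (List.range 6).map (fun _ => (List.range 7).map (fun _ => "-"))
  let crd : PySem.Dict Int Int :=
    PySem.Dict.ofList ((List.range 7).map (fun c => ((c : Int), (5 : Int))))
  let st := columns.foldl
    (fun (s : List (List String) × PySem.Dict Int Int × String) move =>
      let row := s.2.1.getD move 0      -- KeyError (move ∉ 0..6) excluded by Pre_
      let d := s.2.1.insert move (row - 1)
      let b := PySem.List.pySetD s.1 row
        (PySem.List.pySetD (PySem.List.pyGetD s.1 row []) move s.2.2)  -- board[row][move] = player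
      (b, d, if s.2.2 == "Y" then "R" else "Y"))
    (board, crd, "Y")
  st.1

-- ===== PORT B =====
def connect_four_place_alt (columns : List Int) : List (List String) :=
  let board := (List.range 6).map (fun _ => (List.range 7).map (fun _ => "-"))
  let stk0 : PySem.Dict Int (List String) :=
    PySem.Dict.ofList ((List.range 7).map (fun c => ((c : Int), ([] : List String))))
  let stks := (PySem.List.enumerate columns 0).foldl
    (fun st p => st.modify p.2 []
      (fun l => l ++ [if PySem.Int.mod p.1 2 == 0 then "Y" else "R"]))
    stk0
  (List.range 7).foldl (fun b c =>
    (PySem.List.enumerate (stks.getD (c : Int) []) 0).foldl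
      (fun b q => PySem.List.pySetD b (5 - q.1)
        (PySem.List.pySetD (PySem.List.pyGetD b (5 - q.1) []) (c : Int) q.2))  -- board[5-depth][c] = coin
      b)
    board

-- ===== PRECONDITION & SPEC =====
-- Pre_ excludes exactly the inputs where A raises: a move outside 0..6 (KeyError), or a column
-- receiving more than 12 coins (the 13th reaches board[-7], IndexError).
def Pre_connect_four_place (columns : List Int) : Prop :=
  ∀ m ∈ columns, 0 ≤ m ∧ m < 7 ∧ columns.count m ≤ 12
instance (columns : List Int) : Decidable (Pre_connect_four_place columns) := by
  unfold Pre_connect_four_place; infer_instance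
def pvWitness_connect_four_place : List Int := [0, 1, 0, 2]

def Spec_connect_four_place (columns : List Int) (out : List (List String)) : Prop := out = connect_four_place_alt columns
instance (columns : List Int) (out : List (List String)) : Decidable (Spec_connect_four_place columns out) := by unfold Spec_connect_four_place; infer_instance

-- ===== CLAIM (what is proved, stated in full; the proofs are below) =====
def Claim_equal_connect_four_place : Prop := ∀ (columns : List Int), Dom_connect_four_place columns → Pre_connect_four_place columns → Spec_connect_four_place columns (connect_four_place columns)

-- ===== LEMMAS AND PROOFS =====

-- a single Python write  b[r][c] = v  (total form; in range under Pre_)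
def pvW (b : List (List String)) (r c : Int) (v : String) : List (List String) :=
  PySem.List.pySetD b r (PySem.List.pySetD (PySem.List.pyGetD b r []) c v)

-- fill one column's stack downward from row r
def pvFillCol (c : Int) : List (List String) → Int → List String → List (List String)
  | b, _, [] => b
  | b, r, v :: vs => pvFillCol c (pvW b r c v) (r - 1) vs

-- A's loop, abstracted: moves paired with their players, dict as a function
def pvGenA : List (List String) → (Int → Int) → List (Int × String) → List (List String)
  | b, _, [] => b
  | b, f, (m, p) :: rest =>
      pvGenA (pvW b (f m) m p) (fun c => if c = m then f m - 1 else f c) rest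

-- B's fill, abstracted: bucket each column's coins out of the move list
def pvGenB : List Int → List (List String) → (Int → Int) → List (Int × String) → List (List String)
  | [], b, _, _ => b
  | c :: cs, b, f, mv =>
      pvGenB cs (pvFillCol c b (f c) ((mv.filter (fun p => p.1 == c)).map (·.2))) f mv

-- moves paired with toggled players (A's player variable)
def pvPairs : List Int → String → List (Int × String)
  | [], _ => []
  | m :: ms, p => (m, p) :: pvPairs ms (if p == "Y" then "R" else "Y")

def pvCols7 : List Int := [0, 1, 2, 3, 4, 5, 6]

lemma pyIdx?_some_lt {n : Nat} {i : Int} {k : Nat} (h : PySem.List.pyIdx? n i = some k) : k < n := by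
  unfold PySem.List.pyIdx? at h
  split_ifs at h with h1 h2 h3 <;> simp_all <;> omega

lemma pySetD_some {α : Type} (xs : List α) (i : Int) (v : α) {k : Nat}
    (h : PySem.List.pyIdx? xs.length i = some k) :
    PySem.List.pySetD xs i v = xs.set k v := by
  simp [PySem.List.pySetD, PySem.List.pySet?, h]

lemma pyGetD_some {α : Type} (xs : List α) (i : Int) (d : α) {k : Nat}
    (h : PySem.List.pyIdx? xs.length i = some k) :
    PySem.List.pyGetD xs i d = xs.getD k d := by
  simp [PySem.List.pyGetD, PySem.List.pyGet?, h, List.getD_eq_getElem?_getD]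

lemma pvW_none (b : List (List String)) (r c : Int) (v : String)
    (h : PySem.List.pyIdx? b.length r = none) : pvW b r c v = b := by
  simp [pvW, PySem.List.pySetD, PySem.List.pySet?, h]

lemma pvW_some (b : List (List String)) (r c : Int) (v : String) {k : Nat}
    (h : PySem.List.pyIdx? b.length r = some k) :
    pvW b r c v = b.set k (PySem.List.pySetD (b.getD k []) c v) := by
  rw [pvW, pyGetD_some b r [] h, pySetD_some b r _ h]

lemma pySetD_comm {α : Type} (l : List α) (c1 c2 : Int) (v1 v2 : α)
    (h1 : 0 ≤ c1) (h2 : 0 ≤ c2) (hne : c1 ≠ c2) :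
    PySem.List.pySetD (PySem.List.pySetD l c1 v1) c2 v2
      = PySem.List.pySetD (PySem.List.pySetD l c2 v2) c1 v1 := by
  rw [PySem.List.pySetD_of_nonneg l v1 h1, PySem.List.pySetD_of_nonneg l v2 h2,
      PySem.List.pySetD_of_nonneg _ v2 h2, PySem.List.pySetD_of_nonneg _ v1 h1,
      List.set_comm _ _ (show c1.toNat ≠ c2.toNat by omega)]

lemma pvW_comm (b : List (List String)) (r1 r2 c1 c2 : Int) (v1 v2 : String)
    (h1 : 0 ≤ c1) (h2 : 0 ≤ c2) (hne : c1 ≠ c2) :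
    pvW (pvW b r1 c1 v1) r2 c2 v2 = pvW (pvW b r2 c2 v2) r1 c1 v1 := by
  have hlen1 : (pvW b r1 c1 v1).length = b.length := by
    simp [pvW, PySem.List.length_pySetD]
  have hlen2 : (pvW b r2 c2 v2).length = b.length := by
    simp [pvW, PySem.List.length_pySetD]
  cases e1 : PySem.List.pyIdx? b.length r1 with
  | none =>
      rw [pvW_none b r1 c1 v1 e1, pvW_none _ r1 c1 v1 (by rw [hlen2]; exact e1)]
  | some k1 =>
      cases e2 : PySem.List.pyIdx? b.length r2 with
      | none =>
          rw [pvW_none b r2 c2 v2 e2, pvW_none _ r2 c2 v2 (by rw [hlen1]; exact e2)]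
      | some k2 =>
          have hk1 := pyIdx?_some_lt e1
          have hk2 := pyIdx?_some_lt e2
          rw [pvW_some b r1 c1 v1 e1, pvW_some b r2 c2 v2 e2]
          rw [pvW_some _ r2 c2 v2 (by simpa using e2), pvW_some _ r1 c1 v1 (by simpa using e1)]
          by_cases hk : k1 = k2
          · subst hk
            have g1 : (b.set k1 (PySem.List.pySetD (b.getD k1 []) c1 v1)).getD k1 []
                = PySem.List.pySetD (b.getD k1 []) c1 v1 := by
              simp [List.getD_eq_getElem?_getD, List.getElem?_set_self hk1]
            have g2 : (b.set k1 (PySem.List.pySetD (b.getD k1 []) c2 v2)).getD k1 []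
                = PySem.List.pySetD (b.getD k1 []) c2 v2 := by
              simp [List.getD_eq_getElem?_getD, List.getElem?_set_self hk2]
            rw [g1, g2, List.set_set, List.set_set, pySetD_comm _ c1 c2 v1 v2 h1 h2 hne]
          · have g1 : (b.set k1 (PySem.List.pySetD (b.getD k1 []) c1 v1)).getD k2 []
                = b.getD k2 [] := by
              simp [List.getD_eq_getElem?_getD, List.getElem?_set_ne hk]
            have g2 : (b.set k2 (PySem.List.pySetD (b.getD k2 []) c2 v2)).getD k1 []
                = b.getD k1 [] := by
              simp [List.getD_eq_getElem?_getD, List.getElem?_set_ne (Ne.symm hk)]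
            rw [g1, g2, List.set_comm _ _ hk]

lemma pvFillCol_W_comm (s : List String) (b : List (List String)) (c m r r' : Int) (v : String)
    (hc : 0 ≤ c) (hm : 0 ≤ m) (hne : c ≠ m) :
    pvFillCol c (pvW b r' m v) r s = pvW (pvFillCol c b r s) r' m v := by
  induction s generalizing b r with
  | nil => rfl
  | cons x xs ih =>
      simp only [pvFillCol]
      rw [pvW_comm b r' r m c v x hm hc (Ne.symm hne), ih]

lemma pvGenB_congr (cols : List Int) (b : List (List String)) (f g : Int → Int)
    (mv1 mv2 : List (Int × String))
    (h : ∀ c ∈ cols, f c = g c ∧ mv1.filter (fun p => p.1 == c) = mv2.filter (fun p => p.1 == c)) :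
    pvGenB cols b f mv1 = pvGenB cols b g mv2 := by
  induction cols generalizing b with
  | nil => rfl
  | cons c cs ih =>
      obtain ⟨hf, hflt⟩ := h c (by simp)
      simp only [pvGenB, hf, hflt]
      exact ih _ (fun x hx => h x (by simp [hx]))

lemma pvGenB_nil (cols : List Int) (b : List (List String)) (f : Int → Int) :
    pvGenB cols b f [] = b := by
  induction cols generalizing b with
  | nil => rfl
  | cons c cs ih => simpa [pvGenB, pvFillCol] using ih b

lemma pvGenB_cons_mem (cols : List Int) (b : List (List String)) (f : Int → Int)
    (m : Int) (p : String) (rest : List (Int × String))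
    (hnd : cols.Nodup) (hmem : m ∈ cols) (hpos : ∀ c ∈ cols, 0 ≤ c) :
    pvGenB cols b f ((m, p) :: rest)
      = pvGenB cols (pvW b (f m) m p) (fun c => if c = m then f m - 1 else f c) rest := by
  induction cols generalizing b with
  | nil => simp at hmem
  | cons c cs ih =>
      have hnd' := List.nodup_cons.mp hnd
      by_cases hcm : c = m
      · subst hcm
        simp only [pvGenB]
        have hflt : List.filter (fun q => q.1 == c) ((c, p) :: rest)
            = (c, p) :: List.filter (fun q => q.1 == c) rest := by
          simp
        rw [hflt, List.map_cons, pvFillCol]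
        simp only [if_true]
        exact pvGenB_congr cs _ f (fun x => if x = c then f c - 1 else f x) ((c, p) :: rest) rest
          (fun x hx => by
            have hxc : x ≠ c := fun h => hnd'.1 (h ▸ hx)
            refine ⟨(if_neg hxc).symm, ?_⟩
            rw [List.filter_cons, if_neg (by simpa using fun h => hxc h.symm)])
      · have hmem' : m ∈ cs := by
          rcases List.mem_cons.mp hmem with h | h
          · exact absurd h.symm hcm
          · exact h
        simp only [pvGenB]
        have hflt : List.filter (fun q => q.1 == c) ((m, p) :: rest)
            = List.filter (fun q => q.1 == c) rest := by
          rw [List.filter_cons, if_neg (by simpa using fun h => hcm h.symm)]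
        rw [hflt, ih _ hnd'.2 hmem' (fun x hx => hpos x (List.mem_cons_of_mem _ hx)),
          show (if c = m then f m - 1 else f c) = f c from if_neg hcm,
          pvFillCol_W_comm _ b c m (f c) (f m) p (hpos c (by simp)) (hpos m hmem) hcm]

lemma pvGenA_eq_genB (mv : List (Int × String)) (b : List (List String)) (f : Int → Int)
    (hmv : ∀ p ∈ mv, 0 ≤ p.1 ∧ p.1 < 7) :
    pvGenA b f mv = pvGenB pvCols7 b f mv := by
  induction mv generalizing b f with
  | nil => exact (pvGenB_nil _ _ _).symm
  | cons q rest ih =>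
      obtain ⟨m, p⟩ := q
      obtain ⟨hm0, hm7⟩ := hmv (m, p) (by simp)
      have hmem : m ∈ pvCols7 := by
        simp only [pvCols7]; simp only [List.mem_cons]; omega
      rw [pvGenA, ih _ _ (fun q hq => hmv q (by simp [hq])),
        pvGenB_cons_mem pvCols7 b f m p rest (by decide) hmem (by decide)]

lemma pvPairs_mem (ms : List Int) (s : String) (q : Int × String) (h : q ∈ pvPairs ms s) :
    q.1 ∈ ms := by
  induction ms generalizing s with
  | nil => simp [pvPairs] at h
  | cons m ms ih =>
      simp only [pvPairs, List.mem_cons] at h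
      rcases h with h | h
      · simp [h]
      · exact List.mem_cons_of_mem _ (ih _ h)

lemma pvPairs_eq_enum (ms : List Int) (i : Nat) :
    pvPairs ms (if i % 2 = 0 then "Y" else "R")
      = (PySem.List.enumerate ms (i : Int)).map
          (fun p => (p.2, if PySem.Int.mod p.1 2 == 0 then "Y" else "R")) := by
  induction ms generalizing i with
  | nil => simp [pvPairs]
  | cons m ms ih =>
      rw [PySem.List.enumerate_cons, List.map_cons]
      have hmod : PySem.Int.mod (i : Int) 2 = ((i % 2 : Nat) : Int) := by
        exact_mod_cast PySem.Int.mod_natCast i 2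
      have htail := ih (i + 1)
      rcases Nat.mod_two_eq_zero_or_one i with h0 | h0
      · have h1 : (i + 1) % 2 = 1 := by omega
        rw [h0] at hmod
        rw [h1, if_neg (by omega : ¬ (1 : Nat) = 0)] at htail
        push_cast at htail
        rw [if_pos h0, pvPairs, show (if ("Y" : String) == "Y" then "R" else "Y") = "R" from rfl]
        congr 1
        · rw [hmod]
          norm_num
      · have h1 : (i + 1) % 2 = 0 := by omega
        rw [h0] at hmod
        rw [h1, if_pos rfl] at htail
        push_cast at htail
        rw [if_neg (by omega : ¬ i % 2 = 0), pvPairs,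
          show (if ("R" : String) == "Y" then "R" else "Y") = "Y" from rfl]
        congr 1
        · rw [hmod]
          norm_num

lemma pvA_loop (ms : List Int) (b : List (List String)) (d : PySem.Dict Int Int) (p : String) :
    (ms.foldl
      (fun (s : List (List String) × PySem.Dict Int Int × String) move =>
        let row := s.2.1.getD move 0
        let d := s.2.1.insert move (row - 1)
        let b := PySem.List.pySetD s.1 row
          (PySem.List.pySetD (PySem.List.pyGetD s.1 row []) move s.2.2)
        (b, d, if s.2.2 == "Y" then "R" else "Y"))
      (b, d, p)).1
    = pvGenA b (fun c => d.getD c 0) (pvPairs ms p) := by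
  induction ms generalizing b d p with
  | nil => rfl
  | cons m ms ih =>
      simp only [List.foldl_cons, pvPairs, pvGenA]
      rw [ih]
      congr 1
      funext c
      rw [PySem.Dict.getD_insert]

lemma pvFill_enum (c : Int) (s : List String) (d0 : Int) (b : List (List String)) :
    (PySem.List.enumerate s d0).foldl
      (fun b q => PySem.List.pySetD b (5 - q.1)
        (PySem.List.pySetD (PySem.List.pyGetD b (5 - q.1) []) c q.2)) b
    = pvFillCol c b (5 - d0) s := by
  induction s generalizing d0 b with
  | nil => rfl
  | cons x xs ih =>
      rw [PySem.List.enumerate_cons, List.foldl_cons, ih, pvFillCol]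
      have h : 5 - (d0 + 1) = 5 - d0 - 1 := by ring
      rw [h]
      simp [pvW]


def pvBoard0 : List (List String) :=
  (List.range 6).map (fun _ => (List.range 7).map (fun _ => "-"))
def pvCrd : PySem.Dict Int Int :=
  PySem.Dict.ofList ((List.range 7).map (fun c => ((c : Int), (5 : Int))))
def pvStk0 : PySem.Dict Int (List String) :=
  PySem.Dict.ofList ((List.range 7).map (fun c => ((c : Int), ([] : List String))))
def pvMv (columns : List Int) : List (Int × String) :=
  (PySem.List.enumerate columns 0).map
    (fun p => (p.2, if PySem.Int.mod p.1 2 == 0 then "Y" else "R"))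

lemma pvA_eq (columns : List Int) :
    connect_four_place columns
      = pvGenA pvBoard0 (fun c => pvCrd.getD c 0) (pvPairs columns "Y") := by
  unfold connect_four_place
  exact pvA_loop columns pvBoard0 pvCrd "Y"

def pvStksD (columns : List Int) : PySem.Dict Int (List String) :=
  (PySem.List.enumerate columns 0).foldl
    (fun st p => st.modify p.2 []
      (fun l => l ++ [if PySem.Int.mod p.1 2 == 0 then "Y" else "R"])) pvStk0

lemma pvStks_getD (columns : List Int) (c : Int) :
    (pvStksD columns).getD c []
      = pvStk0.getD c [] ++ ((pvMv columns).filter (fun q => q.1 == c)).map (·.2) := by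
  rw [pvStksD, ← PySem.Dict.getD_foldl_modify_append (pvMv columns) pvStk0 c]
  congr 1
  rw [pvMv, List.foldl_map]

lemma pvFillAll (stks : PySem.Dict Int (List String)) (mv : List (Int × String))
    (cols : List Int) (b : List (List String))
    (hst : ∀ c ∈ cols, stks.getD c [] = (mv.filter (fun q => q.1 == c)).map (·.2)) :
    cols.foldl (fun b c =>
      (PySem.List.enumerate (stks.getD c []) 0).foldl
        (fun b q => PySem.List.pySetD b (5 - q.1)
          (PySem.List.pySetD (PySem.List.pyGetD b (5 - q.1) []) c q.2)) b) b
    = pvGenB cols b (fun _ => 5) mv := by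
  induction cols generalizing b with
  | nil => rfl
  | cons c cs ih =>
      rw [List.foldl_cons, pvFill_enum, pvGenB, hst c (by simp),
        show (5 : Int) - 0 = 5 by norm_num]
      exact ih _ (fun x hx => hst x (by simp [hx]))

lemma pvB_eq (columns : List Int) :
    connect_four_place_alt columns = pvGenB pvCols7 pvBoard0 (fun _ => 5) (pvMv columns) := by
  have hst : ∀ c ∈ pvCols7, (pvStksD columns).getD c []
      = ((pvMv columns).filter (fun q => q.1 == c)).map (·.2) := by
    intro c hc
    rw [pvStks_getD columns c]
    have h0 : pvStk0.getD c [] = [] := by fin_cases hc <;> decide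
    rw [h0, List.nil_append]
  exact pvFillAll (pvStksD columns) (pvMv columns) pvCols7 pvBoard0 hst

-- ===== VERDICT (by name: the statement is the Claim_ definition above) =====
theorem connect_four_place_spec : Claim_equal_connect_four_place := by
  intro columns _ hpre
  show connect_four_place columns = connect_four_place_alt columns
  have hmv : ∀ q ∈ pvPairs columns "Y", 0 ≤ q.1 ∧ q.1 < 7 := by
    intro q hq
    have h := hpre q.1 (pvPairs_mem columns "Y" q hq)
    exact ⟨h.1, h.2.1⟩
  have hpairs : pvPairs columns "Y" = pvMv columns := by
    have h := pvPairs_eq_enum columns 0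
    rw [show (if 0 % 2 = 0 then "Y" else "R") = "Y" from rfl,
      show ((0 : Nat) : Int) = 0 from rfl] at h
    exact h
  rw [pvA_eq, pvB_eq, pvGenA_eq_genB _ _ _ hmv, hpairs]
  exact pvGenB_congr pvCols7 pvBoard0 _ _ _ _
    (fun c hc => ⟨by fin_cases hc <;> decide, rfl⟩)
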